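-- pv_equiv track=rewrite | github.com/vlasmirnov/MAGUS | align/merge/graph_trace/naive.py | naiveCluster
-- ===== SOURCE A (Python) =====
-- def naiveCluster(lowerBound, upperBound):
--     clusters = []
--     i = 0
--     while True:
--         cluster = []
--         for j in range(len(lowerBound)):
--             if lowerBound[j] + i < upperBound[j]:
--                 cluster.append(lowerBound[j] + i)
--         if len(cluster) == 0:
--             break
--         clusters.append(cluster)
--         i = i+1
--     return clusters
-- ===== SOURCE B (Python) =====
-- def naiveCluster(lowerBound, upperBound):
--     # Keep only the pairs that can still produce an entry; shrink the active
--     # set as i grows instead of rescanning every index each round.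
--     active = [(lo, hi) for lo, hi in zip(lowerBound, upperBound) if lo < hi]
--     clusters = []
--     i = 0
--     while active:
--         clusters.append([lo + i for lo, hi in active])
--         i += 1
--         active = [(lo, hi) for lo, hi in active if lo + i < hi]
--     return clusters
-- ===== Notes on version B (the rewrite author's own statement) =====
-- stated objective: faster
-- what changed: B pairs the bounds once with zip, keeps only the still-live pairs in an 'active' list and shrinks it each round, so every round costs only the size of the cluster it emits instead of rescanning all n indices.
import Mathlib
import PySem

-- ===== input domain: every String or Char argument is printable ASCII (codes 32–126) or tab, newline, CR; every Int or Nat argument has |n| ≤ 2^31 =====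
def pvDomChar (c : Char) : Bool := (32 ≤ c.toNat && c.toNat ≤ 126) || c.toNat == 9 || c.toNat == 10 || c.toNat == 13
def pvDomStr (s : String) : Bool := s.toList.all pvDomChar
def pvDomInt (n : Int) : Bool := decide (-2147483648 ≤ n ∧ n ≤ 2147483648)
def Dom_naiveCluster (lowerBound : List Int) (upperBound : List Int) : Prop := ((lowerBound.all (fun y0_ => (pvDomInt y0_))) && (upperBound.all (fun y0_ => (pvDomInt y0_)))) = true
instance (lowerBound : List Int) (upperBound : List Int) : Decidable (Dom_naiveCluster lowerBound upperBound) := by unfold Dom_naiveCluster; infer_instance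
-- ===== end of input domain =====

-- B replaces A's rescan of all n indices per row by a shrinking 'active' list of
-- zipped (lo, hi) pairs, so each round costs only the size of the row it emits.

-- ===== PORT A =====
-- inner 'for j in range(len(lowerBound))' loop of A (one row / cluster)
def pvRowA (lb ub : List Int) (i : Int) : List Int :=
  (List.range lb.length).foldl
    (fun cluster j =>
      if lb.getD j 0 + i < ub.getD j 0 then cluster ++ [lb.getD j 0 + i] else cluster) []
-- NOTE: ub.getD j 0 — Python raises IndexError when j ≥ len(upperBound); Pre_ excludes that.

-- fuel bound for A's 'while True' loop (a totality guard only: the loop stops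
-- as soon as i reaches the largest upperBound[j] - lowerBound[j])
def pvGapA (lb ub : List Int) : Int :=
  (List.range lb.length).foldl (fun m j => max m (ub.getD j 0 - lb.getD j 0)) 0

def pvLoopA (lb ub : List Int) (fuel : Nat) (i : Int) (clusters : List (List Int)) : List (List Int) :=
  match fuel with
  | 0 => clusters
  | n + 1 =>
    let cluster := pvRowA lb ub i
    if cluster = [] then clusters
    else pvLoopA lb ub n (i + 1) (clusters ++ [cluster])

def naiveCluster (lowerBound : List Int) (upperBound : List Int) : List (List Int) :=
  pvLoopA lowerBound upperBound ((pvGapA lowerBound upperBound).toNat + 1) 0 []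

-- ===== PORT B =====
-- fuel bound for B's 'while active' loop (totality guard only)
def pvGapB (pairs : List (Int × Int)) : Int :=
  pairs.foldl (fun m p => max m (p.2 - p.1)) 0

def pvLoopB (fuel : Nat) (i : Int) (active : List (Int × Int)) (clusters : List (List Int)) : List (List Int) :=
  match fuel with
  | 0 => clusters
  | n + 1 =>
    if active = [] then clusters
    else pvLoopB n (i + 1) (active.filter (fun p => p.1 + (i + 1) < p.2))
           (clusters ++ [active.map (fun p => p.1 + i)])

def naiveCluster_alt (lowerBound : List Int) (upperBound : List Int) : List (List Int) :=
  let pairs := lowerBound.zip upperBound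
  let active := pairs.filter (fun p => p.1 < p.2)
  pvLoopB ((pvGapB pairs).toNat + 1) 0 active []

-- ===== PRECONDITION & SPEC =====
-- Pre_ excludes exactly the inputs where A raises IndexError: len(upperBound) < len(lowerBound).
def Pre_naiveCluster (lowerBound : List Int) (upperBound : List Int) : Prop :=
  lowerBound.length ≤ upperBound.length
instance (lowerBound : List Int) (upperBound : List Int) : Decidable (Pre_naiveCluster lowerBound upperBound) := by unfold Pre_naiveCluster; infer_instance
def pvWitness_naiveCluster : List Int × List Int := ([0, 3], [2, 4])

def Spec_naiveCluster (lowerBound : List Int) (upperBound : List Int) (out : List (List Int)) : Prop := out = naiveCluster_alt lowerBound upperBound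
instance (lowerBound : List Int) (upperBound : List Int) (out : List (List Int)) : Decidable (Spec_naiveCluster lowerBound upperBound out) := by unfold Spec_naiveCluster; infer_instance

-- ===== CLAIM (what is proved, stated in full; the proofs are below) =====
def Claim_equal_naiveCluster : Prop := ∀ (lowerBound : List Int) (upperBound : List Int), Dom_naiveCluster lowerBound upperBound → Pre_naiveCluster lowerBound upperBound → Spec_naiveCluster lowerBound upperBound (naiveCluster lowerBound upperBound)

-- ===== LEMMAS AND PROOFS =====

lemma pv_foldl_append_if {α β : Type} (p : α → Prop) [DecidablePred p] (f : α → β) :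
    ∀ (l : List α) (init : List β),
      l.foldl (fun acc x => if p x then acc ++ [f x] else acc) init
        = init ++ (l.filter (fun x => decide (p x))).map f := by
  intro l
  induction l with
  | nil => intro init; simp
  | cons a t ih =>
    intro init
    by_cases h : p a <;> simp [List.foldl_cons, h, ih]

lemma pv_le_foldl_max {α : Type} (f : α → Int) :
    ∀ (l : List α) (a : Int), a ≤ l.foldl (fun m x => max m (f x)) a := by
  intro l
  induction l with
  | nil => intro a; simp
  | cons b t ih =>
    intro a
    exact le_trans (le_max_left a (f b)) (ih _)

lemma pv_mem_le_foldl_max {α : Type} (f : α → Int) :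
    ∀ (l : List α) (a : Int) (x : α), x ∈ l → f x ≤ l.foldl (fun m x => max m (f x)) a := by
  intro l
  induction l with
  | nil => intro a x hx; simp at hx
  | cons b t ih =>
    intro a x hx
    rcases List.mem_cons.mp hx with h | h
    · subst h
      exact le_trans (le_max_right a (f x)) (pv_le_foldl_max f t _)
    · exact ih _ x h

lemma pvRowA_eq (lb ub : List Int) (i : Int) :
    pvRowA lb ub i
      = ((List.range lb.length).filter
          (fun j => decide (lb.getD j 0 + i < ub.getD j 0))).map (fun j => lb.getD j 0 + i) := by
  simpa using pv_foldl_append_if (fun j => lb.getD j 0 + i < ub.getD j 0)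
    (fun j => lb.getD j 0 + i) (List.range lb.length) []

lemma pvRowA_lt (lb ub : List Int) (i : Int) (h : pvRowA lb ub i ≠ []) : i < pvGapA lb ub := by
  rw [pvRowA_eq] at h
  have hf : (List.range lb.length).filter (fun j => decide (lb.getD j 0 + i < ub.getD j 0)) ≠ [] := by
    intro hnil
    rw [hnil] at h
    exact h rfl
  rcases List.exists_mem_of_ne_nil _ hf with ⟨j, hj⟩
  rw [List.mem_filter] at hj
  have hlt : lb.getD j 0 + i < ub.getD j 0 := by simpa using hj.2
  have hle : ub.getD j 0 - lb.getD j 0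
      ≤ pvGapA lb ub :=
    pv_mem_le_foldl_max (fun j => ub.getD j 0 - lb.getD j 0) (List.range lb.length) 0 j hj.1
  omega

-- under Pre_, the zipped pairs are exactly the indexed reads A performs
lemma pv_range_map_eq_zip (lb ub : List Int) (h : lb.length ≤ ub.length) :
    (List.range lb.length).map (fun j => (lb.getD j 0, ub.getD j 0)) = lb.zip ub := by
  apply List.ext_getElem
  · simp [List.length_zip]; omega
  · intro k h1 h2
    have hk : k < lb.length := by simpa using h1
    have hk2 : k < ub.length := lt_of_lt_of_le hk h
    simp [List.getElem_zip, List.getD_eq_getElem?_getD, hk, hk2]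

lemma pvRow_eq_map (lb ub : List Int) (h : lb.length ≤ ub.length) (i : Int) :
    pvRowA lb ub i
      = ((lb.zip ub).filter (fun p => decide (p.1 + i < p.2))).map (fun p => p.1 + i) := by
  rw [pvRowA_eq, ← pv_range_map_eq_zip lb ub h, List.filter_map, List.map_map]
  rfl

lemma pv_filter_step (pairs : List (Int × Int)) (i : Int) :
    (pairs.filter (fun p => decide (p.1 + i < p.2))).filter (fun p => decide (p.1 + (i + 1) < p.2))
      = pairs.filter (fun p => decide (p.1 + (i + 1) < p.2)) := by
  rw [List.filter_filter]
  apply List.filter_congr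
  intro p _
  by_cases hp : p.1 + (i + 1) < p.2
  · have : p.1 + i < p.2 := by omega
    simp [hp, this]
  · simp [hp]

lemma pvGapB_eq (lb ub : List Int) (h : lb.length ≤ ub.length) :
    pvGapB (lb.zip ub) = pvGapA lb ub := by
  rw [pvGapB, ← pv_range_map_eq_zip lb ub h, List.foldl_map]
  rfl

lemma pv_loop_eq (lb ub : List Int) (h : lb.length ≤ ub.length) :
    ∀ (nA : Nat) (nB : Nat) (i : Int) (c : List (List Int)),
      pvGapA lb ub - i < nA → pvGapA lb ub - i < nB →
      pvLoopA lb ub nA i c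
        = pvLoopB nB i ((lb.zip ub).filter (fun p => decide (p.1 + i < p.2))) c := by
  intro nA
  induction nA with
  | zero =>
    intro nB i c hA hB
    have hrow : pvRowA lb ub i = [] := by
      by_contra hne
      have := pvRowA_lt lb ub i hne
      omega
    have hact : (lb.zip ub).filter (fun p => decide (p.1 + i < p.2)) = [] := by
      have := pvRow_eq_map lb ub h i
      rw [hrow] at this
      exact (List.map_eq_nil_iff.mp this.symm)
    cases nB with
    | zero => simp [pvLoopA, pvLoopB]
    | succ m => simp [pvLoopA, pvLoopB, hact]
  | succ n ih =>
    intro nB i c hA hB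
    by_cases hrow : pvRowA lb ub i = []
    · have hact : (lb.zip ub).filter (fun p => decide (p.1 + i < p.2)) = [] := by
        have := pvRow_eq_map lb ub h i
        rw [hrow] at this
        exact (List.map_eq_nil_iff.mp this.symm)
      cases nB with
      | zero => simp [pvLoopA, pvLoopB, hrow]
      | succ m => simp [pvLoopA, pvLoopB, hrow, hact]
    · have hlt : i < pvGapA lb ub := pvRowA_lt lb ub i hrow
      have hact : (lb.zip ub).filter (fun p => decide (p.1 + i < p.2)) ≠ [] := by
        intro hnil
        apply hrow
        rw [pvRow_eq_map lb ub h i, hnil]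
        rfl
      cases nB with
      | zero => omega
      | succ m =>
        have step : pvLoopA lb ub (n + 1) i c
            = pvLoopA lb ub n (i + 1) (c ++ [pvRowA lb ub i]) := by
          simp [pvLoopA, hrow]
        have stepB : pvLoopB (m + 1) i ((lb.zip ub).filter (fun p => decide (p.1 + i < p.2))) c
            = pvLoopB m (i + 1) ((lb.zip ub).filter (fun p => decide (p.1 + (i + 1) < p.2)))
                (c ++ [((lb.zip ub).filter (fun p => decide (p.1 + i < p.2))).map (fun p => p.1 + i)]) := by
          rw [pvLoopB]
          rw [if_neg hact, pv_filter_step]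
        rw [step, stepB, ← pvRow_eq_map lb ub h i]
        exact ih m (i + 1) (c ++ [pvRowA lb ub i]) (by omega) (by omega)

-- ===== VERDICT (by name: the statement is the Claim_ definition above) =====
theorem naiveCluster_spec : Claim_equal_naiveCluster := by
  intro lb ub _ hpre
  unfold Spec_naiveCluster naiveCluster naiveCluster_alt
  have h : lb.length ≤ ub.length := hpre
  have hfilter : (lb.zip ub).filter (fun p => decide (p.1 < p.2))
      = (lb.zip ub).filter (fun p => decide (p.1 + 0 < p.2)) := by
    apply List.filter_congr
    intro p _
    simp
  show pvLoopA lb ub ((pvGapA lb ub).toNat + 1) 0 []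
      = pvLoopB ((pvGapB (lb.zip ub)).toNat + 1) 0
          ((lb.zip ub).filter (fun p => decide (p.1 < p.2))) []
  rw [hfilter, pvGapB_eq lb ub h]
  exact pv_loop_eq lb ub h _ _ 0 [] (by omega) (by omega)
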